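-- pv_equiv track=rewrite | github.com/osj3474/Algorithm-Practice | Practice/Greedy/greedy2.py | selectNum
-- ===== SOURCE A (Python) =====
-- def selectNum(number_int, k):
--     pickedNum = 0
--     length = len(number_int)
--     for i in range(9, -1, -1):
--         try:
--             for j in range(length):
--                 if number_int[j] == i:
--                     idx = j
--                     break
--             if idx <= k:
--                 pickedNum = number_int[idx]
--                 number_int = number_int[idx+1:]
--                 k -= idx
--                 break
--         except:
--             pass
--     return pickedNum, number_int, k
-- ===== SOURCE B (Python) =====
-- def selectNum(number_int, k):
--     # single left-to-right scan of the first k+1 positions instead of ten digit-scans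
--     best_val, best_idx = -1, -1
--     j = 0
--     n = len(number_int)
--     while j < n and j <= k:
--         v = number_int[j]
--         if 0 <= v <= 9 and v > best_val:
--             best_val, best_idx = v, j
--         j += 1
--     if best_idx < 0:
--         return 0, number_int, k
--     return best_val, number_int[best_idx+1:], k - best_idx
-- ===== Notes on version B (the rewrite author's own statement) =====
-- stated objective: simpler
-- what changed: Replaced A's ten descending digit-scans (with try/except around a possibly-unbound index) by one left-to-right positional pass over the first k+1 elements keeping the best digit and its leftmost index.
import Mathlib
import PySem

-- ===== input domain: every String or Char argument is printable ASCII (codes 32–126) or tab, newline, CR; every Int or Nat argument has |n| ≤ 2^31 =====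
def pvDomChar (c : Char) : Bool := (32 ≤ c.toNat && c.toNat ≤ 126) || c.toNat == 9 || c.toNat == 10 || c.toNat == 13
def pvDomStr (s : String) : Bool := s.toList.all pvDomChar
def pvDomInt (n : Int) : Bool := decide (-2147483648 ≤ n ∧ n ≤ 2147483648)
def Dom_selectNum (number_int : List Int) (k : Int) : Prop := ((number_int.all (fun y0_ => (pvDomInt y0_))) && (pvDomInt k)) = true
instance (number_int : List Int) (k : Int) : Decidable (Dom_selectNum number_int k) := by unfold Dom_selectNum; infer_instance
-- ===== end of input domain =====

-- B replaces A's ten descending digit-scans (with try/except over a possibly-unbound index)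
-- by one left-to-right pass over the first k+1 positions; equivalence is about the return value.

-- ===== PORT A =====
-- inner 'for j in range(length): if number_int[j] == i: idx = j; break'
def findIdxAux (i : Int) : List Int → Nat → Option Nat
  | [], _ => none
  | x :: xs, j => if x = i then some j else findIdxAux i xs (j + 1)

-- outer 'for i in range(9,-1,-1)' with try/except: idx? = none models an unbound 'idx' (NameError → pass);
-- a stale idx from an earlier iteration is carried in idx?; pickedNum stays 0 until the break.
def loopA (number_int : List Int) (k : Int) (idx? : Option Nat) : List Int → Int × List Int × Int
  | [] => (0, number_int, k)
  | i :: rest =>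
    match (match findIdxAux i number_int 0 with | some j => some j | none => idx?) with
    | none => loopA number_int k none rest
    | some idx =>
      if (idx : Int) ≤ k then
        match PySem.List.pyGet? number_int (idx : Int) with
        | some v => (v, PySem.List.slice number_int (some ((idx : Int) + 1)) none, k - (idx : Int))
        | none => loopA number_int k (some idx) rest  -- IndexError → pass (never reached: idx is in range)
      else loopA number_int k (some idx) rest

def selectNum (number_int : List Int) (k : Int) : Int × List Int × Int :=
  loopA number_int k none (PySem.List.pyRange 9 (-1) (-1))

-- ===== PORT B =====
-- 'while j < n and j <= k: v = number_int[j]; if 0 <= v <= 9 and v > best_val: update'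
def scanB (k : Int) : List Int → Nat → Int × Int → Int × Int
  | [], _, b => b
  | v :: xs, j, (bv, bi) =>
    if (j : Int) ≤ k then
      scanB k xs (j + 1) (if 0 ≤ v ∧ v ≤ 9 ∧ bv < v then (v, (j : Int)) else (bv, bi))
    else (bv, bi)

def selectNum_alt (number_int : List Int) (k : Int) : Int × List Int × Int :=
  let b := scanB k number_int 0 (-1, -1)
  if b.2 < 0 then (0, number_int, k)
  else (b.1, PySem.List.slice number_int (some (b.2 + 1)) none, k - b.2)

-- ===== PRECONDITION & SPEC =====
def Spec_selectNum (number_int : List Int) (k : Int) (out : Int × List Int × Int) : Prop := out = selectNum_alt number_int k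
instance (number_int : List Int) (k : Int) (out : Int × List Int × Int) : Decidable (Spec_selectNum number_int k out) := by unfold Spec_selectNum; infer_instance

-- ===== CLAIM (what is proved, stated in full; the proofs are below) =====
def Claim_equal_selectNum : Prop := ∀ (number_int : List Int) (k : Int), Dom_selectNum number_int k → Spec_selectNum number_int k (selectNum number_int k)

-- ===== LEMMAS AND PROOFS =====

-- (v, j) is a qualifying candidate: a digit value at a position inside the first k+1 positions
def inW (nums : List Int) (k v : Int) (j : Nat) : Prop :=
  nums[j]? = some v ∧ (j : Int) ≤ k ∧ 0 ≤ v ∧ v ≤ 9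

-- A's loop, stale idx ignored: first digit d in ds whose first occurrence is ≤ k
def firstHit (nums : List Int) (k : Int) : List Int → Option (Int × Nat)
  | [] => none
  | d :: ds =>
    match findIdxAux d nums 0 with
    | some j => if (j : Int) ≤ k then some (d, j) else firstHit nums k ds
    | none => firstHit nums k ds

def dList : Nat → List Int
  | 0 => []
  | n + 1 => (n : Int) :: dList n

theorem findIdxAux_some (d : Int) (l : List Int) (m j : Nat)
    (h : findIdxAux d l m = some j) :
    ∃ t, j = m + t ∧ l[t]? = some d ∧ ∀ t', l[t']? = some d → t ≤ t' := by
  induction l generalizing m with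
  | nil => simp [findIdxAux] at h
  | cons x xs ih =>
    by_cases hx : x = d
    · simp [findIdxAux, hx] at h
      exact ⟨0, by omega, by simp [hx], fun t' _ => Nat.zero_le _⟩
    · simp [findIdxAux, hx] at h
      obtain ⟨t, ht, hget, hmin⟩ := ih (m + 1) h
      refine ⟨t + 1, by omega, by simpa using hget, ?_⟩
      intro t' hget'
      cases t' with
      | zero => simp at hget'; exact absurd hget' hx
      | succ s => simpa using Nat.succ_le_succ (hmin s (by simpa using hget'))

theorem findIdxAux_none (d : Int) (l : List Int) (m : Nat)
    (h : findIdxAux d l m = none) : ∀ t : Nat, l[t]? ≠ some d := by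
  induction l generalizing m with
  | nil => intro t; simp
  | cons x xs ih =>
    by_cases hx : x = d
    · simp [findIdxAux, hx] at h
    · simp [findIdxAux, hx] at h
      intro t
      cases t with
      | zero => simpa using hx
      | succ s => simpa using ih (m + 1) h s

-- A's loop equals firstHit, provided any stale idx is > k
theorem loopA_eq (nums : List Int) (k : Int) :
    ∀ (ds : List Int) (idx? : Option Nat), (∀ j, idx? = some j → ¬((j : Int) ≤ k)) →
    loopA nums k idx? ds =
      (match firstHit nums k ds with
       | none => (0, nums, k)
       | some (d, j) => (d, PySem.List.slice nums (some ((j : Int) + 1)) none, k - (j : Int))) := by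
  intro ds
  induction ds with
  | nil => intro idx? _; simp [loopA, firstHit]
  | cons i rest ih =>
    intro idx? hinv
    cases hf : findIdxAux i nums 0 with
    | none =>
      cases hidx : idx? with
      | none => simp [loopA, hf, firstHit, ih none (by simp)]
      | some j0 =>
        have hk := hinv j0 hidx
        simp [loopA, hf, hk, firstHit, ih (some j0) (by intro j hj; cases hj; exact hk)]
    | some j =>
      by_cases hk : (j : Int) ≤ k
      · obtain ⟨t, ht, hget, _⟩ := findIdxAux_some i nums 0 j hf
        have ht0 : j = t := by omega
        subst ht0
        have hpg : PySem.List.pyGet? nums (j : Int) = some i := by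
          rw [PySem.List.pyGet?_natCast]; exact hget
        simp [loopA, hf, hk, hpg, firstHit]
      · simp [loopA, hf, hk, firstHit, ih (some j) (by intro j' hj'; cases hj'; exact hk)]

-- firstHit over the descending digits [n-1, …, 0] picks the best qualifying digit, leftmost
theorem firstHit_dList (nums : List Int) (k : Int) :
    ∀ n, n ≤ 10 →
    (∀ d j, firstHit nums k (dList n) = some (d, j) →
        inW nums k d j ∧ (∀ v j', inW nums k v j' → v < (n : Int) → v ≤ d) ∧
        (∀ j', nums[j']? = some d → j ≤ j')) ∧
    (firstHit nums k (dList n) = none → ∀ v j, inW nums k v j → ¬ v < (n : Int)) := by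
  intro n
  induction n with
  | zero =>
    intro _
    constructor
    · intro d j h; simp [dList, firstHit] at h
    · intro _ v j hw; obtain ⟨_, _, hv0, _⟩ := hw; omega
  | succ n ih =>
    intro hn
    have ih' := ih (by omega)
    have hstep : ∀ v j', inW nums k v j' → v < ((n : Int) + 1) → v ≠ (n : Int) → v < (n : Int) := by
      intro v j' _ hlt hne; omega
    cases hf : findIdxAux (n : Int) nums 0 with
    | none =>
      have hnone := findIdxAux_none (n : Int) nums 0 hf
      have hext : ∀ v j', inW nums k v j' → v ≠ (n : Int) ∨ False := by
        intro v j' hw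
        obtain ⟨hget, _, _, _⟩ := hw
        by_cases hv : v = (n : Int)
        · exact absurd (hv ▸ hget) (hnone j')
        · exact Or.inl hv
      constructor
      · intro d j h
        simp only [dList, firstHit, hf] at h
        obtain ⟨hw, hmax, hleft⟩ := ih'.1 d j h
        refine ⟨hw, ?_, hleft⟩
        intro v j' hw' hlt
        rcases hext v j' hw' with hne | hF
        · exact hmax v j' hw' (by exact_mod_cast hstep v j' hw' (by exact_mod_cast hlt) hne)
        · exact hF.elim
      · intro h v j hw
        simp only [dList, firstHit, hf] at h
        rcases hext v j hw with hne | hF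
        · have := ih'.2 h v j hw
          intro hlt
          exact this (hstep v j hw (by exact_mod_cast hlt) hne)
        · exact hF.elim
    | some j0 =>
      obtain ⟨t, ht, hget, hmin⟩ := findIdxAux_some (n : Int) nums 0 j0 hf
      have ht0 : j0 = t := by omega
      subst ht0
      by_cases hk : (j0 : Int) ≤ k
      · constructor
        · intro d j h
          simp only [dList, firstHit, hf, if_pos hk, Option.some.injEq, Prod.mk.injEq] at h
          obtain ⟨hd, hj⟩ := h
          subst hd; subst hj
          refine ⟨⟨hget, hk, by positivity, by exact_mod_cast (by omega : n ≤ 9)⟩, ?_, hmin⟩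
          intro v j' hw hlt
          push_cast at hlt; omega
        · intro h
          simp [dList, firstHit, hf, hk] at h
      · -- first occurrence of n is beyond k: no candidate has value n
        have hnoN : ∀ j', ¬ inW nums k (n : Int) j' := by
          intro j' hw
          obtain ⟨hget', hk', _, _⟩ := hw
          have := hmin j' hget'
          omega
        constructor
        · intro d j h
          simp only [dList, firstHit, hf, if_neg hk] at h
          obtain ⟨hw, hmax, hleft⟩ := ih'.1 d j h
          refine ⟨hw, ?_, hleft⟩
          intro v j' hw' hlt
          by_cases hv : v = (n : Int)
          · exact absurd (hv ▸ hw') (hnoN j')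
          · exact hmax v j' hw' (by push_cast at hlt ⊢; omega)
        · intro h v j hw
          simp only [dList, firstHit, hf, if_neg hk] at h
          by_cases hv : v = (n : Int)
          · exact absurd (hv ▸ hw) (hnoN j)
          · have := ih'.2 h v j hw
            push_cast at this ⊢; omega

-- B's scan: the fold keeps the best qualifying value with its leftmost index
theorem scanB_inv (k : Int) :
    ∀ (l : List Int) (j : Nat) (bv bi : Int),
      bv ≤ (scanB k l j (bv, bi)).1 ∧
      (∀ (t : Nat) (v : Int), l[t]? = some v → (j : Int) + (t : Int) ≤ k → 0 ≤ v → v ≤ 9 →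
        v ≤ (scanB k l j (bv, bi)).1) ∧
      (scanB k l j (bv, bi) = (bv, bi) ∨
       ∃ t : Nat, l[t]? = some ((scanB k l j (bv, bi)).1) ∧ (j : Int) + (t : Int) ≤ k ∧
         (scanB k l j (bv, bi)).2 = (j : Int) + (t : Int) ∧
         0 ≤ (scanB k l j (bv, bi)).1 ∧ (scanB k l j (bv, bi)).1 ≤ 9 ∧ bv < (scanB k l j (bv, bi)).1 ∧
         ∀ (t' : Nat) (v' : Int), t' < t → l[t']? = some v' → 0 ≤ v' → v' ≤ 9 →
           v' < (scanB k l j (bv, bi)).1) := by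
  intro l
  induction l with
  | nil =>
    intro j bv bi
    refine ⟨le_refl _, ?_, Or.inl rfl⟩
    intro t v h; simp at h
  | cons v xs ih =>
    intro j bv bi
    by_cases hk : (j : Int) ≤ k
    · by_cases hup : 0 ≤ v ∧ v ≤ 9 ∧ bv < v
      · -- update branch
        have hr : scanB k (v :: xs) j (bv, bi) = scanB k xs (j + 1) (v, (j : Int)) := by
          simp [scanB, hk, hup]
        obtain ⟨ha, hb, hc⟩ := ih (j + 1) v (j : Int)
        rw [hr]
        refine ⟨le_of_lt (lt_of_lt_of_le hup.2.2 ha), ?_, ?_⟩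
        · intro t w hget hkt h0 h9
          cases t with
          | zero => simp at hget; subst hget; exact ha
          | succ s =>
            refine hb s w (by simpa using hget) ?_ h0 h9
            push_cast at hkt ⊢; omega
        · rcases hc with heq | ⟨t, hget, hkt, hidx, h0, h9, hlt, hprev⟩
          · refine Or.inr ⟨0, ?_, by simpa using hk, ?_, ?_, ?_, ?_, ?_⟩
            · simp [heq]
            · simp [heq]
            · simp [heq]; exact hup.1
            · simp [heq]; exact hup.2.1
            · simp [heq]; exact hup.2.2
            · intro t' v' ht'; omega
          · refine Or.inr ⟨t + 1, by simpa using hget, by push_cast at hkt ⊢; omega,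
              by rw [hidx]; push_cast; ring, h0, h9, lt_trans hup.2.2 hlt, ?_⟩
            intro t' v' ht' hget' h0' h9'
            cases t' with
            | zero => simp at hget'; subst hget'; exact hlt
            | succ s => exact hprev s v' (by omega) (by simpa using hget') h0' h9'
      · -- no-update branch
        have hr : scanB k (v :: xs) j (bv, bi) = scanB k xs (j + 1) (bv, bi) := by
          simp [scanB, hk, hup]
        obtain ⟨ha, hb, hc⟩ := ih (j + 1) bv bi
        rw [hr]
        refine ⟨ha, ?_, ?_⟩
        · intro t w hget hkt h0 h9
          cases t with
          | zero =>
            simp at hget; subst hget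
            have hvb : v ≤ bv := by
              by_contra hgt
              exact hup ⟨h0, h9, by omega⟩
            exact le_trans hvb ha
          | succ s =>
            refine hb s w (by simpa using hget) ?_ h0 h9
            push_cast at hkt ⊢; omega
        · rcases hc with heq | ⟨t, hget, hkt, hidx, h0, h9, hlt, hprev⟩
          · exact Or.inl heq
          · refine Or.inr ⟨t + 1, by simpa using hget, by push_cast at hkt ⊢; omega,
              by rw [hidx]; push_cast; ring, h0, h9, hlt, ?_⟩
            intro t' v' ht' hget' h0' h9'
            cases t' with
            | zero =>
              simp at hget'; subst hget'
              have hvb : v ≤ bv := by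
                by_contra hgt
                exact hup ⟨h0', h9', by omega⟩
              omega
            | succ s => exact hprev s v' (by omega) (by simpa using hget') h0' h9'
    · -- window ended: j > k
      have hr : scanB k (v :: xs) j (bv, bi) = (bv, bi) := by simp [scanB, hk]
      rw [hr]
      refine ⟨le_refl _, ?_, Or.inl rfl⟩
      intro t w _ hkt _ _
      exfalso; omega

theorem dList_ten : dList 10 = PySem.List.pyRange 9 (-1) (-1) := by decide

-- ===== VERDICT (by name: the statement is the Claim_ definition above) =====
theorem selectNum_spec : Claim_equal_selectNum := by
  intro nums k _
  unfold Spec_selectNum selectNum selectNum_alt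
  rw [← dList_ten, loopA_eq nums k (dList 10) none (by simp)]
  obtain ⟨ha, hb, hc⟩ := scanB_inv k nums 0 (-1) (-1)
  set r := scanB k nums 0 (-1, -1) with hrdef
  obtain ⟨hA, hAnone⟩ := firstHit_dList nums k 10 (le_refl _)
  cases hfh : firstHit nums k (dList 10) with
  | none =>
    have hW : ∀ v j, ¬ inW nums k v j := by
      intro v j hw
      have h9 := hw.2.2.2
      exact hAnone hfh v j hw (by omega)
    rcases hc with heq | ⟨t, hget, hkt, _, h0, h9, _, _⟩
    · simp [heq]
    · exact absurd ⟨hget, by simpa using hkt, h0, h9⟩ (hW r.1 t)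
  | some dj =>
    obtain ⟨d, j⟩ := dj
    obtain ⟨hw, hmax, hleft⟩ := hA d j hfh
    have hd0 : 0 ≤ d := hw.2.2.1
    rcases hc with heq | ⟨t, hget, hkt, hidx, h0, h9, _, hprev⟩
    · -- B found nothing: contradicts candidate (d, j)
      exfalso
      have := hb j d hw.1 (by simpa using hw.2.1) hd0 hw.2.2.2
      rw [heq] at this; omega
    · -- both found: values equal, indices equal
      have hr1d : r.1 = d := by
        have h1 : r.1 ≤ d := hmax r.1 t ⟨hget, by simpa using hkt, h0, h9⟩ (by omega)
        have h2 : d ≤ r.1 := hb j d hw.1 (by simpa using hw.2.1) hd0 hw.2.2.2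
        omega
      have hjt : j = t := by
        have h1 : j ≤ t := hleft t (hr1d ▸ hget)
        by_contra hne
        have htj : j < t := by omega
        have := hprev j d htj hw.1 hd0 hw.2.2.2
        omega
      subst hjt
      have hr2 : r.2 = (j : Int) := by rw [hidx]; push_cast; ring
      simp only [hr1d, hr2]
      rw [if_neg (by omega : ¬ (j : Int) < 0)]
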